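-- pv_equiv track=rewrite | github.com/TuanAnhDoHoang/copy-network | IPadd_handle.py | mask_to_numHost
-- ===== SOURCE A (Python) =====
-- def mask_to_numHost(mask):
--     # Caculating number of host available from subnetmask
--     bit_subNet = mask%8
--     octet_net = mask//8
--     octet_remainder = 4 - octet_net
--     #Host = octet hoàn chỉnh + octet bị chiếm
--
--     numHost = 1
--     # A class
--     if octet_remainder == 3:
--         numHost *= 2*pow(2,8)
--         if bit_subNet > 0:
--            bit_remainder = 8 - bit_subNet
--            numHost *= sum(pow(2, x) for x in range (bit_remainder))
--            return numHost
--     # B class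
--     elif octet_remainder == 2:
--         numHost *= 1*pow(2, 8)
--         if bit_subNet > 0:
--             bit_remainder = 8 - bit_subNet
--             numHost *= sum(pow(2, x) for x in range(bit_remainder))
--             return numHost
--     # C class
--     elif octet_remainder == 1:
--         numHost *= 0*pow(2, 8)
--         if bit_subNet > 0:
--            bit_remainder = 8 - bit_subNet
--            numHost += sum(pow(2, x) for x in range(bit_remainder))
--            return numHost
-- ===== SOURCE B (Python) =====
-- def mask_to_numHost(mask):
--     # Closed-form table-driven version: base[octet_remainder] * (2**(8-bit) - 1)
--     bit_subNet = mask % 8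
--     octet_remainder = 4 - mask // 8
--     base = {3: 512, 2: 256, 1: 1}
--     if octet_remainder in base and bit_subNet > 0:
--         return base[octet_remainder] * (2 ** (8 - bit_subNet) - 1)
-- ===== Notes on version B (the rewrite author's own statement) =====
-- stated objective: simpler
-- what changed: Replaced A's three near-duplicate class branches and the geometric-sum loop by one closed-form expression base[octet_remainder] * (2**(8-bit)-1) driven by a small lookup table.
import Mathlib
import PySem

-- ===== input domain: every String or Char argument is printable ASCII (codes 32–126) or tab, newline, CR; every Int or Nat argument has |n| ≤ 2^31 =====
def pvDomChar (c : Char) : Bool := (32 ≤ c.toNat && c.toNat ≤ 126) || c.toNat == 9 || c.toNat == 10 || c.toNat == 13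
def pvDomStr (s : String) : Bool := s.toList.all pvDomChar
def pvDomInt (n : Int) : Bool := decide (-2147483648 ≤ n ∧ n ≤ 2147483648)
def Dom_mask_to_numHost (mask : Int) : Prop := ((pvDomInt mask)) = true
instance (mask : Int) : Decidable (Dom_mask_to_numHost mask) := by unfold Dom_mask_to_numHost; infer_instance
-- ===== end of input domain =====

-- ===== PORT A =====
-- B replaces A's three class branches and the geometric-sum loop by one table-driven closed form (objective: simpler).
def mask_to_numHost (mask : Int) : Option Int :=
  let bit_subNet := PySem.Int.mod mask 8
  let octet_net := PySem.Int.floordiv mask 8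
  let octet_remainder := 4 - octet_net
  let numHost : Int := 1
  if octet_remainder = 3 then
    let numHost := numHost * (2 * (2:Int)^(8:Nat))
    if bit_subNet > 0 then
      let bit_remainder := 8 - bit_subNet
      let numHost := numHost * ((PySem.List.pyRange 0 bit_remainder 1).foldl (fun s x => s + (2:Int)^x.toNat) 0)
      some numHost
    else none
  else if octet_remainder = 2 then
    let numHost := numHost * (1 * (2:Int)^(8:Nat))
    if bit_subNet > 0 then
      let bit_remainder := 8 - bit_subNet
      let numHost := numHost * ((PySem.List.pyRange 0 bit_remainder 1).foldl (fun s x => s + (2:Int)^x.toNat) 0)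
      some numHost
    else none
  else if octet_remainder = 1 then
    let numHost := numHost * (0 * (2:Int)^(8:Nat))
    if bit_subNet > 0 then
      let bit_remainder := 8 - bit_subNet
      let numHost := numHost + ((PySem.List.pyRange 0 bit_remainder 1).foldl (fun s x => s + (2:Int)^x.toNat) 0)
      some numHost
    else none
  else none

-- ===== PORT B =====
def mask_to_numHost_alt (mask : Int) : Option Int :=
  let bit_subNet := PySem.Int.mod mask 8
  let octet_remainder := 4 - PySem.Int.floordiv mask 8
  let base : PySem.Dict Int Int := PySem.Dict.ofList [(3, 512), (2, 256), (1, 1)]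
  if (PySem.Dict.get? base octet_remainder).isSome ∧ bit_subNet > 0 then
    some (PySem.Dict.getD base octet_remainder 0 * ((2:Int)^(8 - bit_subNet).toNat - 1))
  else none

-- ===== PRECONDITION & SPEC =====
def Spec_mask_to_numHost (mask : Int) (out : Option Int) : Prop := out = mask_to_numHost_alt mask
instance (mask : Int) (out : Option Int) : Decidable (Spec_mask_to_numHost mask out) := by unfold Spec_mask_to_numHost; infer_instance

-- ===== CLAIM (what is proved, stated in full; the proofs are below) =====
def Claim_equal_mask_to_numHost : Prop := ∀ (mask : Int), Dom_mask_to_numHost mask → Spec_mask_to_numHost mask (mask_to_numHost mask)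

-- ===== LEMMAS AND PROOFS =====

-- Both ports depend on mask only through q = mask // 8 and r = mask % 8; prove agreement for those.
lemma mask_qr (q r : Int) (mask : Int) (hq : PySem.Int.floordiv mask 8 = q)
    (hr : PySem.Int.mod mask 8 = r) (hr0 : 0 ≤ r) (hr8 : r < 8) :
    mask_to_numHost mask = mask_to_numHost_alt mask := by
  unfold mask_to_numHost mask_to_numHost_alt
  rw [hq, hr]
  by_cases h1 : (4 : Int) - q = 3
  · simp only [h1, if_pos]
    have hr' : r = 1 ∨ r = 2 ∨ r = 3 ∨ r = 4 ∨ r = 5 ∨ r = 6 ∨ r = 7 ∨ r = 0 := by omega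
    rcases hr' with rfl|rfl|rfl|rfl|rfl|rfl|rfl|rfl <;> decide
  · by_cases h2 : (4 : Int) - q = 2
    · simp only [h2]
      have hr' : r = 1 ∨ r = 2 ∨ r = 3 ∨ r = 4 ∨ r = 5 ∨ r = 6 ∨ r = 7 ∨ r = 0 := by omega
      rcases hr' with rfl|rfl|rfl|rfl|rfl|rfl|rfl|rfl <;> decide
    · by_cases h3 : (4 : Int) - q = 1
      · simp only [h3]
        have hr' : r = 1 ∨ r = 2 ∨ r = 3 ∨ r = 4 ∨ r = 5 ∨ r = 6 ∨ r = 7 ∨ r = 0 := by omega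
        rcases hr' with rfl|rfl|rfl|rfl|rfl|rfl|rfl|rfl <;> decide
      · have e : PySem.Dict.ofList ([(3, 512), (2, 256), (1, 1)] : List (Int × Int)) = PySem.Dict.mk [(3, 512), (2, 256), (1, 1)] := by decide
        have e1 : ((3:Int) == 4 - q) = false := by simp; omega
        have e2 : ((2:Int) == 4 - q) = false := by simp; omega
        have e3 : ((1:Int) == 4 - q) = false := by simp; omega
        have hb : (PySem.Dict.get? (PySem.Dict.ofList ([(3, 512), (2, 256), (1, 1)] : List (Int × Int))) (4 - q)).isSome = false := by
          rw [e]; simp [e1, e2, e3, PySem.Dict.get?]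
        simp [h1, h2, h3, hb]

-- ===== VERDICT (by name: the statement is the Claim_ definition above) =====
theorem mask_to_numHost_spec : Claim_equal_mask_to_numHost := by
  intro mask _
  unfold Spec_mask_to_numHost
  exact (mask_qr (PySem.Int.floordiv mask 8) (PySem.Int.mod mask 8) mask rfl rfl
    (PySem.Int.mod_nonneg _ (by norm_num)) (PySem.Int.mod_lt _ (by norm_num)))
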